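-- pv_equiv track=rewrite | github.com/CBS-HPC/repokit-backup | src/repokit_backup/remote_types.py | infer_backend_from_remote_name
-- ===== SOURCE A (Python) =====
-- from typing import Final
--
-- BACKEND_ALIASES: Final[dict[str, str]] = {
--     "dropbox": "dropbox",
--     "onedrive": "onedrive",
--     "drive": "drive",
--     "googledrive": "drive",
--     "gdrive": "drive",
--     "erda": "erda",
--     "ucloud": "ucloud",
--     "lumio": "lumio",
--     "lumi-o": "lumio",
--     "lumip": "lumip",
--     "lumi-p": "lumip",
--     "lumi-f": "lumip",
--     "lumi": "lumio",  # legacy fallback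
--     "local": "local",
--     "s3": "s3",
--     "sftp": "sftp",
-- }
--
-- def infer_backend_from_remote_name(remote_name: str | None) -> str | None:
--     """
--     Infer backend from alias prefix for backward compatibility.
--     Returns None if no known prefix is present.
--     """
--     remote_lower = (remote_name or "").strip().lower()
--     if not remote_lower:
--         return None
--
--     for alias in sorted(BACKEND_ALIASES.keys(), key=len, reverse=True):
--         if remote_lower == alias:
--             return BACKEND_ALIASES[alias]
--         if remote_lower.startswith(alias):
--             next_char = remote_lower[len(alias) : len(alias) + 1]
--             if next_char in {"", "-", "_", ":"}:
--                 return BACKEND_ALIASES[alias]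
--     return None
-- ===== SOURCE B (Python) =====
-- from typing import Final
--
-- BACKEND_ALIASES: Final[dict[str, str]] = {
--     "dropbox": "dropbox",
--     "onedrive": "onedrive",
--     "drive": "drive",
--     "googledrive": "drive",
--     "gdrive": "drive",
--     "erda": "erda",
--     "ucloud": "ucloud",
--     "lumio": "lumio",
--     "lumi-o": "lumio",
--     "lumip": "lumip",
--     "lumi-p": "lumip",
--     "lumi-f": "lumip",
--     "lumi": "lumio",  # legacy fallback
--     "local": "local",
--     "s3": "s3",
--     "sftp": "sftp",
-- }
--
--
-- def infer_backend_from_remote_name(remote_name):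
--     """Infer backend from alias prefix: segment the input at '-'/'_'/':' boundaries
--     and look each candidate prefix up directly, keeping the longest hit."""
--     remote_lower = (remote_name or "").strip().lower()
--     if not remote_lower:
--         return None
--     boundaries = [i for i, ch in enumerate(remote_lower) if ch in "-_:"]
--     candidates = [remote_lower[:i] for i in boundaries] + [remote_lower]
--     best = None
--     for cand in candidates:  # ascending length; the last hit is the longest
--         hit = BACKEND_ALIASES.get(cand)
--         if hit is not None:
--             best = hit
--     return best
-- ===== Notes on version B (the rewrite author's own statement) =====
-- stated objective: alternative
-- what changed: Instead of scanning the length-sorted alias table and testing every alias as a prefix with a boundary check, B segments the input once at its separator-character positions, looks each candidate prefix (plus the whole string) up directly in BACKEND_ALIASES, and keeps the longest hit.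
import Mathlib
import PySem

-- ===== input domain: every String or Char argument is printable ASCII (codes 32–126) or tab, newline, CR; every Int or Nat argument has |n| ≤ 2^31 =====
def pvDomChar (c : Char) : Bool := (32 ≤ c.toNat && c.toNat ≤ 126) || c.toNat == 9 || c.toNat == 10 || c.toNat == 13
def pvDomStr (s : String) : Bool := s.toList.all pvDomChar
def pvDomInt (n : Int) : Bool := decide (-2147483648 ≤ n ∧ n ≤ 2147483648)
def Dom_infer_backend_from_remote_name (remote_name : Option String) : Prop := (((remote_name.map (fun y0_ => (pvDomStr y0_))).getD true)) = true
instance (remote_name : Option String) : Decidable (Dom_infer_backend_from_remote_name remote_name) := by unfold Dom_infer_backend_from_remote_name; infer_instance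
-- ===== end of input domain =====

-- B replaces the scan over the sorted alias table by a single segmentation of the
-- input at '-'/'_'/':' boundaries with direct dict lookups (objective: alternative).


-- ===== PORT A =====
def BACKEND_ALIASES : PySem.Dict String String :=
  PySem.Dict.ofList
    [("dropbox", "dropbox"), ("onedrive", "onedrive"), ("drive", "drive"),
     ("googledrive", "drive"), ("gdrive", "drive"), ("erda", "erda"),
     ("ucloud", "ucloud"), ("lumio", "lumio"), ("lumi-o", "lumio"),
     ("lumip", "lumip"), ("lumi-p", "lumip"), ("lumi-f", "lumip"),
     ("lumi", "lumio"), ("local", "local"), ("s3", "s3"), ("sftp", "sftp")]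

-- the 'for alias in …' loop of A (early returns become recursion); BACKEND_ALIASES[alias]
-- is ported as getD with dummy default "" — exact because every iterated alias is a key
def aliasLoop (remote_lower : String) : List String → Option String
  | [] => none
  | al :: rest =>
    if remote_lower = al then some (PySem.Dict.getD BACKEND_ALIASES al "")
    else if PySem.Str.startswith remote_lower al
            && (["", "-", "_", ":"] : List String).contains
                 (PySem.Str.slice remote_lower (some (PySem.Str.len al))
                   (some (PySem.Str.len al + 1))) then
      some (PySem.Dict.getD BACKEND_ALIASES al "")
    else aliasLoop remote_lower rest

def infer_backend_from_remote_name (remote_name : Option String) : Option String :=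
  let remote_lower := PySem.Str.lower (PySem.Str.strip (remote_name.getD ""))
  if remote_lower = "" then none
  else aliasLoop remote_lower
    (PySem.List.sorted (PySem.Dict.keys BACKEND_ALIASES) (fun a => PySem.Str.len a) true)

-- ===== PORT B =====
def infer_backend_from_remote_name_alt (remote_name : Option String) : Option String :=
  let remote_lower := PySem.Str.lower (PySem.Str.strip (remote_name.getD ""))
  if remote_lower = "" then none
  else
    let boundaries : List Int :=
      ((PySem.List.enumerate remote_lower.toList).filter
        (fun p => ("-_:".toList).contains p.2)).map (fun p => p.1)
    let candidates : List String :=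
      boundaries.map (fun i => PySem.Str.slice remote_lower none (some i)) ++ [remote_lower]
    candidates.foldl (fun best cand =>
      match PySem.Dict.get? BACKEND_ALIASES cand with
      | some hit => some hit
      | none => best) none

-- ===== PRECONDITION & SPEC =====
def Spec_infer_backend_from_remote_name (remote_name : Option String) (out : Option String) : Prop := out = infer_backend_from_remote_name_alt remote_name
instance (remote_name : Option String) (out : Option String) : Decidable (Spec_infer_backend_from_remote_name remote_name out) := by unfold Spec_infer_backend_from_remote_name; infer_instance

-- ===== CLAIM (what is proved, stated in full; the proofs are below) =====
def Claim_equal_infer_backend_from_remote_name : Prop := ∀ (remote_name : Option String), Dom_infer_backend_from_remote_name remote_name → Spec_infer_backend_from_remote_name remote_name (infer_backend_from_remote_name remote_name)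

-- ===== LEMMAS AND PROOFS =====

-- the alias keys as sorted by A (length-descending, stable)
def Klit : List String :=
  ["googledrive", "onedrive", "dropbox", "gdrive", "ucloud", "lumi-o", "lumi-p",
   "lumi-f", "drive", "lumio", "lumip", "local", "erda", "lumi", "sftp", "s3"]

lemma sortedKeys_eq :
    PySem.List.sorted (PySem.Dict.keys BACKEND_ALIASES) (fun a => PySem.Str.len a) true
      = Klit := by decide

-- the common match condition: alias a is a prefix of s ending at the end of s or at a boundary
def condB (a : String) (s : List Char) : Bool :=
  a.toList.isPrefixOf s &&
    (match s.drop a.toList.length with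
     | [] => true
     | c :: _ => ("-_:".toList).contains c)

lemma slice_toList (r al : String) :
    (PySem.Str.slice r (some (PySem.Str.len al)) (some (PySem.Str.len al + 1))).toList
      = (r.toList.drop al.toList.length).take 1 := by
  rw [PySem.Str.toList_slice, PySem.Chars.slice_eq_listSlice, PySem.Str.len_eq]
  have h : (al.toList.length : Int) + 1 = (al.toList.length : Int) + ((1:Nat):Int) := by norm_num
  rw [h, PySem.List.slice_natCast_add]

lemma eq_lit_iff (x lit : String) (c d : Char) (hx : x.toList = [c]) (hl : lit.toList = [d]) :
    (x = lit) ↔ c = d := by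
  constructor
  · intro h; rw [h, hl] at hx; injection hx.symm
  · intro h; subst h; exact String.toList_inj.mp (hx.trans hl.symm)

lemma contains4_eq (x : String) (c : Char) (hone : x.toList = [c]) :
    (["", "-", "_", ":"] : List String).contains x = ("-_:".toList).contains c := by
  have hne : ¬ (x = "") := by
    intro h; rw [h] at hone; simp at hone
  have h2 := eq_lit_iff x "-" c '-' hone (by decide)
  have h3 := eq_lit_iff x "_" c '_' hone (by decide)
  have h4 := eq_lit_iff x ":" c ':' hone (by decide)
  have htr : ("-_:".toList).contains c = (decide (c = '-') || decide (c = '_') || decide (c = ':')) := by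
    have h : "-_:".toList = ['-', '_', ':'] := by decide
    rw [h]
    simp [List.contains_eq_mem, Bool.or_assoc]
  rw [Bool.eq_iff_iff, htr]
  simp [List.contains_eq_mem, hne, h2, h3, h4, Bool.or_assoc]

lemma test_eq (r al : String) :
    (PySem.Str.startswith r al
       && (["", "-", "_", ":"] : List String).contains
            (PySem.Str.slice r (some (PySem.Str.len al)) (some (PySem.Str.len al + 1))))
      = condB al r.toList := by
  have hsw : PySem.Str.startswith r al = al.toList.isPrefixOf r.toList := by
    rw [Bool.eq_iff_iff]
    simp [PySem.Str.startswith_eq, PySem.Chars.startswith_iff, List.isPrefixOf_iff_prefix]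
  have hsl := slice_toList r al
  unfold condB
  rcases hd : r.toList.drop al.toList.length with _ | ⟨c, t⟩
  · have hemp : PySem.Str.slice r (some (PySem.Str.len al)) (some (PySem.Str.len al + 1)) = "" := by
      apply String.toList_inj.mp; rw [hsl, hd]; rfl
    rw [hemp]
    have hco : (["", "-", "_", ":"] : List String).contains "" = true := by decide
    rw [hco, Bool.and_true, Bool.and_true, hsw]
  · have hone : (PySem.Str.slice r (some (PySem.Str.len al)) (some (PySem.Str.len al + 1))).toList = [c] := by
      rw [hsl, hd]; rfl
    rw [hsw, contains4_eq _ c hone]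

lemma branch_eq (r al : String) (k cont : Option String) :
    (if r = al then k
     else if PySem.Str.startswith r al
             && (["", "-", "_", ":"] : List String).contains
                  (PySem.Str.slice r (some (PySem.Str.len al))
                    (some (PySem.Str.len al + 1))) then k
     else cont)
    = (if condB al r.toList then k else cont) := by
  rw [test_eq]
  by_cases hra : r = al
  · subst hra
    have hc : condB r r.toList = true := by
      unfold condB
      rw [List.drop_length, Bool.and_true, List.isPrefixOf_iff_prefix]
    simp [hc]
  · rw [if_neg hra]


-- A's loop returns the value of the first condB-match in its list
lemma aliasLoop_eq (r : String) (ls : List String) :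
    aliasLoop r ls
      = ((ls.filter (fun a => condB a r.toList)).head?).map
          (fun a => PySem.Dict.getD BACKEND_ALIASES a "") := by
  induction ls with
  | nil => rfl
  | cons al rest ih =>
    show (if r = al then some (PySem.Dict.getD BACKEND_ALIASES al "")
          else if PySem.Str.startswith r al
                  && (["", "-", "_", ":"] : List String).contains
                       (PySem.Str.slice r (some (PySem.Str.len al))
                         (some (PySem.Str.len al + 1))) then
            some (PySem.Dict.getD BACKEND_ALIASES al "")
          else aliasLoop r rest) = _
    rw [branch_eq, List.filter_cons]
    cases hc : condB al r.toList
    · rw [if_neg (by simp), if_neg (by simp [hc])]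
      exact ih
    · rw [if_pos rfl, if_pos (by simp)]
      simp

-- B's fold keeps the value of the LAST candidate that is a key
lemma foldl_last (cs : List String) (init : Option String) :
    cs.foldl (fun best cand =>
        match PySem.Dict.get? BACKEND_ALIASES cand with
        | some hit => some hit
        | none => best) init
      = match (cs.filter (fun c => (PySem.Dict.get? BACKEND_ALIASES c).isSome)).getLast? with
        | some c => PySem.Dict.get? BACKEND_ALIASES c
        | none => init := by
  induction cs generalizing init with
  | nil => rfl
  | cons c t ih =>
    rw [List.foldl_cons, ih]
    rcases hg : PySem.Dict.get? BACKEND_ALIASES c with _ | v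
    · simp [hg]
    · simp only [List.filter_cons, hg, Option.isSome_some, if_pos, List.getLast?_cons]
      rcases hl : (t.filter (fun c => (PySem.Dict.get? BACKEND_ALIASES c).isSome)).getLast? with _ | c2
      · simp [hg]
      · simp

-- membership in Klit is being a key of BACKEND_ALIASES
lemma mem_Klit_iff (a : String) :
    a ∈ Klit ↔ (PySem.Dict.get? BACKEND_ALIASES a).isSome := by
  have hA : BACKEND_ALIASES = PySem.Dict.mk
    [("dropbox", "dropbox"), ("onedrive", "onedrive"), ("drive", "drive"),
     ("googledrive", "drive"), ("gdrive", "drive"), ("erda", "erda"),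
     ("ucloud", "ucloud"), ("lumio", "lumio"), ("lumi-o", "lumio"),
     ("lumip", "lumip"), ("lumi-p", "lumip"), ("lumi-f", "lumip"),
     ("lumi", "lumio"), ("local", "local"), ("s3", "s3"), ("sftp", "sftp")] := by decide
  constructor
  · intro h; fin_cases h <;> decide
  · intro h
    by_contra hmem
    simp only [Klit, List.mem_cons, List.not_mem_nil, or_false, not_or] at hmem
    obtain ⟨h1,h2,h3,h4,h5,h6,h7,h8,h9,h10,h11,h12,h13,h14,h15,h16⟩ := hmem
    rw [hA] at h
    simp [Ne.symm h1, Ne.symm h2, Ne.symm h3, Ne.symm h4,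
      Ne.symm h5, Ne.symm h6, Ne.symm h7, Ne.symm h8, Ne.symm h9, Ne.symm h10,
      Ne.symm h11, Ne.symm h12, Ne.symm h13, Ne.symm h14, Ne.symm h15, Ne.symm h16,
      PySem.Dict.get?] at h

-- in a list with strictly increasing lengths, a member of maximal length is last
lemma getLast_of_max (l : List String) (a : String)
    (hp : l.Pairwise (fun x y => x.toList.length < y.toList.length))
    (ha : a ∈ l) (hmax : ∀ b ∈ l, b.toList.length ≤ a.toList.length) :
    l.getLast? = some a := by
  induction l with
  | nil => cases ha
  | cons x xs ih =>
    rcases xs with _ | ⟨y, ys⟩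
    · simp at ha; simp [ha]
    · rw [List.getLast?_cons_cons]
      have hp2 := (List.pairwise_cons.mp hp).2
      have hx := (List.pairwise_cons.mp hp).1
      rcases List.mem_cons.mp ha with h | h
      · exfalso
        have := hmax y (by simp)
        have := hx y (by simp)
        subst h; omega
      · exact ih hp2 h (fun b hb => hmax b (List.mem_cons_of_mem _ hb))

-- B's locals as named helpers
def pvBoundaries (r : String) : List Int :=
  ((PySem.List.enumerate r.toList).filter (fun p => ("-_:".toList).contains p.2)).map (fun p => p.1)

def pvCandidates (r : String) : List String :=
  (pvBoundaries r).map (fun i => PySem.Str.slice r none (some i)) ++ [r]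

lemma mem_boundaries (r : String) (i : Int) :
    i ∈ pvBoundaries r ↔
      ∃ k : Nat, i = (k : Int) ∧ ∃ hk : k < r.toList.length,
        ("-_:".toList).contains r.toList[k] = true := by
  simp only [pvBoundaries, List.mem_map, List.mem_filter, PySem.List.mem_enumerate_iff]
  constructor
  · rintro ⟨p, ⟨⟨k, hk, rfl⟩, hc⟩, rfl⟩
    exact ⟨k, by simp, hk, hc⟩
  · rintro ⟨k, rfl, hk, hc⟩
    exact ⟨((k : Int), r.toList[k]), ⟨⟨k, hk, by simp⟩, hc⟩, rfl⟩

lemma cand_toList (r : String) (k : Nat) :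
    (PySem.Str.slice r none (some (k : Int))).toList = r.toList.take k := by
  rw [PySem.Str.toList_slice, PySem.Chars.slice_eq_listSlice, PySem.List.slice_to_natCast]

-- F1: every candidate satisfies condB
lemma cand_condB (r : String) (c : String) (hc : c ∈ pvCandidates r) :
    condB c r.toList = true := by
  simp only [pvCandidates, List.mem_append, List.mem_map, List.mem_singleton] at hc
  rcases hc with ⟨i, hib, rfl⟩ | rfl
  · rw [mem_boundaries] at hib
    obtain ⟨k, rfl, hk, hbc⟩ := hib
    unfold condB
    rw [cand_toList]
    have hlen : (r.toList.take k).length = k := by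
      rw [List.length_take]; omega
    rw [hlen]
    have hdrop : r.toList.drop k = r.toList[k] :: r.toList.drop (k + 1) :=
      List.drop_eq_getElem_cons hk
    rw [hdrop, Bool.and_eq_true]
    exact ⟨List.isPrefixOf_iff_prefix.mpr (List.take_prefix _ _), hbc⟩
  · unfold condB
    rw [List.drop_length]
    simp [List.isPrefixOf_iff_prefix]

-- F2: every condB match that could come up is a candidate
lemma condB_mem_cand (r a : String) (h : condB a r.toList = true) :
    a ∈ pvCandidates r := by
  unfold condB at h
  rw [Bool.and_eq_true, List.isPrefixOf_iff_prefix] at h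
  obtain ⟨hpf, hrest⟩ := h
  have hle : a.toList.length ≤ r.toList.length := hpf.length_le
  have htake : a.toList = r.toList.take a.toList.length := List.prefix_iff_eq_take.mp hpf
  rcases hd : r.toList.drop a.toList.length with _ | ⟨c, t⟩
  · -- a is the whole string
    have : a.toList.length = r.toList.length := by
      have h2 := List.drop_eq_nil_iff.mp hd
      omega
    have : a.toList = r.toList := by rw [htake, this, List.take_length]
    have : a = r := String.toList_inj.mp this
    simp [pvCandidates, this]
  · -- boundary char after a
    rw [hd] at hrest
    have hk : a.toList.length < r.toList.length := by
      by_contra hle2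
      rw [List.drop_eq_nil_of_le (by omega)] at hd
      cases hd
    have hgc : r.toList[a.toList.length] = c := by
      have := List.drop_eq_getElem_cons (l := r.toList) hk
      rw [hd] at this
      exact (List.cons_eq_cons.mp this.symm).1
    have hib : ((a.toList.length : Nat) : Int) ∈ pvBoundaries r := by
      rw [mem_boundaries]
      exact ⟨a.toList.length, rfl, hk, by rw [hgc]; exact hrest⟩
    have hsl : PySem.Str.slice r none (some ((a.toList.length : Nat) : Int)) = a := by
      apply String.toList_inj.mp
      rw [cand_toList, ← htake]
    simp only [pvCandidates, List.mem_append, List.mem_map]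
    exact Or.inl ⟨_, hib, hsl⟩

-- F4: candidate lengths strictly increase
lemma cand_pairwise (r : String) :
    (pvCandidates r).Pairwise (fun x y => x.toList.length < y.toList.length) := by
  have hb : (pvBoundaries r).Pairwise (fun i j => i < j) := by
    apply List.Pairwise.map
    · exact fun p q (h : p.1 < q.1) => h
    · exact List.Pairwise.sublist List.filter_sublist
        (PySem.List.pairwise_lt_enumerate r.toList 0)
  have hlen : ∀ i ∈ pvBoundaries r,
      (PySem.Str.slice r none (some i)).toList.length = i.toNat ∧ i.toNat < r.toList.length := by
    intro i hi
    rw [mem_boundaries] at hi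
    obtain ⟨k, rfl, hk, _⟩ := hi
    rw [cand_toList]
    constructor
    · rw [List.length_take]; omega
    · simpa using hk
  rw [pvCandidates, List.pairwise_append]
  refine ⟨?_, by simp, ?_⟩
  · rw [List.pairwise_map]
    refine List.Pairwise.imp_of_mem ?_ hb
    intro i j hi hj hij
    obtain ⟨hli, hbi⟩ := hlen i hi
    obtain ⟨hlj, hbj⟩ := hlen j hj
    rw [hli, hlj]
    have h0i : 0 ≤ i := by
      rw [mem_boundaries] at hi; obtain ⟨k, rfl, _⟩ := hi; positivity
    omega
  · intro x hx y hy
    simp only [List.mem_singleton] at hy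
    subst hy
    simp only [List.mem_map] at hx
    obtain ⟨i, hi, rfl⟩ := hx
    obtain ⟨hli, hbi⟩ := hlen i hi
    omega


lemma KlitPairwise :
    Klit.Pairwise (fun x y => y.toList.length ≤ x.toList.length) := by decide

-- the heart of the equivalence: A's loop over the sorted alias table equals B's
-- fold over the boundary candidates
lemma core (r : String) :
    aliasLoop r Klit
      = (pvCandidates r).foldl (fun best cand =>
          match PySem.Dict.get? BACKEND_ALIASES cand with
          | some hit => some hit
          | none => best) none := by
  rw [aliasLoop_eq, foldl_last]
  rcases hh : (Klit.filter (fun a => condB a r.toList)).head? with _ | a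
  · have hfil : Klit.filter (fun a => condB a r.toList) = [] := List.head?_eq_none_iff.mp hh
    have hcf : (pvCandidates r).filter (fun c => (PySem.Dict.get? BACKEND_ALIASES c).isSome) = [] := by
      apply List.filter_eq_nil_iff.mpr
      intro c hc hsome
      have hKc : c ∈ Klit := (mem_Klit_iff c).mpr (by simpa using hsome)
      have hcond := cand_condB r c hc
      have hmem : c ∈ Klit.filter (fun a => condB a r.toList) := List.mem_filter.mpr ⟨hKc, hcond⟩
      rw [hfil] at hmem; cases hmem
    rw [hcf]; rfl
  · obtain ⟨t, hfil⟩ := List.head?_eq_some_iff.mp hh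
    have hamem : a ∈ Klit.filter (fun a => condB a r.toList) := by
      rw [hfil]; exact List.mem_cons_self ..
    have haK : a ∈ Klit := (List.mem_filter.mp hamem).1
    have hacond : condB a r.toList = true := by
      have := (List.mem_filter.mp hamem).2; simpa using this
    have hsome : (PySem.Dict.get? BACKEND_ALIASES a).isSome := (mem_Klit_iff a).mp haK
    obtain ⟨v, hv⟩ := Option.isSome_iff_exists.mp hsome
    have hlast : ((pvCandidates r).filter
        (fun c => (PySem.Dict.get? BACKEND_ALIASES c).isSome)).getLast? = some a := by
      apply getLast_of_max
      · exact List.Pairwise.sublist List.filter_sublist (cand_pairwise r)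
      · exact List.mem_filter.mpr ⟨condB_mem_cand r a hacond, by simp [hsome]⟩
      · intro b hb
        obtain ⟨hbc, hbs⟩ := List.mem_filter.mp hb
        have hbK : b ∈ Klit := (mem_Klit_iff b).mpr (by simpa using hbs)
        have hbcond := cand_condB r b hbc
        have hbf : b ∈ Klit.filter (fun a => condB a r.toList) := List.mem_filter.mpr ⟨hbK, hbcond⟩
        rw [hfil] at hbf
        rcases List.mem_cons.mp hbf with rfl | hbt
        · exact le_refl _
        · have hkp : (Klit.filter (fun a => condB a r.toList)).Pairwise
              (fun x y => y.toList.length ≤ x.toList.length) :=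
            List.Pairwise.sublist List.filter_sublist KlitPairwise
          rw [hfil] at hkp
          exact (List.pairwise_cons.mp hkp).1 b hbt
    rw [hlast]
    simp [PySem.Dict.getD_eq_get?_getD, hv]

-- ===== VERDICT (by name: the statement is the Claim_ definition above) =====
theorem infer_backend_from_remote_name_spec : Claim_equal_infer_backend_from_remote_name := by
  intro remote_name _
  unfold Spec_infer_backend_from_remote_name
  unfold infer_backend_from_remote_name infer_backend_from_remote_name_alt
  set r := PySem.Str.lower (PySem.Str.strip (remote_name.getD "")) with hr
  by_cases h0 : r = ""
  · simp [h0]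
  · rw [if_neg h0, if_neg h0, sortedKeys_eq]
    exact core r
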